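-- pv_equiv track=rewrite | github.com/emirhanbilgic/clip | evaluate_cub_pointing.py | build_default_concept_to_parts
-- ===== SOURCE A (Python) =====
-- from typing import Dict, List, Tuple, Optional
--
-- def build_default_concept_to_parts(part_id_to_name: Dict[int, str]) -> Dict[str, List[int]]:
--     # Known CUB parts often include: back, beak, belly, breast, crown, forehead,
--     # left eye, right eye, left leg, right leg, left wing, right wing, nape, tail, throat
--     name_map = {pid: name.lower() for pid, name in part_id_to_name.items()}
--
--     def ids_with(tokens: List[str]) -> List[int]:
--         out: List[int] = []
--         for pid, nm in name_map.items():
--             for t in tokens: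
--                 if t in nm:
--                     out.append(pid)
--                     break
--         return out
--
--     def exact(names: List[str]) -> List[int]:
--         targets = set([n.lower() for n in names])
--         return [pid for pid, nm in name_map.items() if nm in targets]
--
--     concept_to_parts: Dict[str, List[int]] = {}
--     concept_to_parts["beak"] = ids_with(["beak", "bill"]) or exact(["beak"])  # robustness
--     concept_to_parts["wing"] = ids_with(["wing"])  # left/right wing
--     concept_to_parts["eye"] = ids_with(["eye"])    # left/right eye
--     concept_to_parts["leg"] = ids_with(["leg"])    # left/right leg
--     concept_to_parts["tail"] = ids_with(["tail"])  # tail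
--     # Head composite: crown, forehead, nape, throat, beak, eyes
--     head_tokens = ["crown", "forehead", "nape", "throat", "beak", "bill", "eye", "head"]
--     concept_to_parts["head"] = ids_with(head_tokens)
--     # Optional torso concepts
--     concept_to_parts["breast"] = ids_with(["breast"]) or exact(["breast"])
--     concept_to_parts["belly"] = ids_with(["belly"]) or exact(["belly"])
--     concept_to_parts["back"] = ids_with(["back"]) or exact(["back"])
--
--     # Remove empty entries
--     concept_to_parts = {k: v for k, v in concept_to_parts.items() if len(v) > 0}
--     return concept_to_parts
-- ===== SOURCE B (Python) =====
-- def build_default_concept_to_parts(part_id_to_name):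
--     # Inverted bitmask index: one pass over the parts computes a 9-bit concept
--     # mask per part from a flat token->bits table; the per-concept id lists then
--     # fall out of the masks with no further string work.  The original's exact()
--     # fallback is dropped: an exact match is always a substring match.
--     CONCEPTS = ["beak", "wing", "eye", "leg", "tail", "head", "breast", "belly", "back"]
--     TOKEN_BITS = {
--         "beak": 0b000100001, "bill": 0b000100001,
--         "wing": 0b000000010,
--         "eye": 0b000100100,
--         "leg": 0b000001000,
--         "tail": 0b000010000,
--         "crown": 0b000100000, "forehead": 0b000100000, "nape": 0b000100000,
--         "throat": 0b000100000, "head": 0b000100000,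
--         "breast": 0b001000000,
--         "belly": 0b010000000,
--         "back": 0b100000000,
--     }
--     name_map = {pid: name.lower() for pid, name in part_id_to_name.items()}
--     masks = []
--     for pid, nm in name_map.items():
--         m = 0
--         for tok, bits in TOKEN_BITS.items():
--             if tok in nm:
--                 m |= bits
--         masks.append((pid, m))
--     result = []
--     for i, concept in enumerate(CONCEPTS):
--         result.append((concept, [pid for pid, m in masks if (m >> i) & 1]))
--     return dict(kv for kv in result if kv[1])
-- ===== Notes on version B (the rewrite author's own statement) =====
-- stated objective: alternative
-- what changed: Replaces A's nine per-concept substring scans of the name map (plus the redundant exact() fallbacks) by an inverted bitmask index: one pass over the lowercased names computes a 9-bit concept mask per part from a flat token-to-bits table, and the per-concept id lists are then read off the masks by bit tests with no further string work; exact() is dropped since an exact match is always a substring match.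
import Mathlib
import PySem

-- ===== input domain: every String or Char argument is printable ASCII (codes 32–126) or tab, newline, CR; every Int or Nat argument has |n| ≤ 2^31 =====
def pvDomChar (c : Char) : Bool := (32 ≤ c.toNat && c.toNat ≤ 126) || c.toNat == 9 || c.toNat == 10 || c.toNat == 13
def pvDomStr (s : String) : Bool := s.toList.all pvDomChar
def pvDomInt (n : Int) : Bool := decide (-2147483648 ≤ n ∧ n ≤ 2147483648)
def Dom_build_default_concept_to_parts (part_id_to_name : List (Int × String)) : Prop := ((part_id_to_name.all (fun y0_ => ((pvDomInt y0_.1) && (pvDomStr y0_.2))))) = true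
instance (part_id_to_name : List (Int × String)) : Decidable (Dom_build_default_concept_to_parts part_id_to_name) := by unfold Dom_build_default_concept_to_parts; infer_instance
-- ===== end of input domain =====

-- B replaces A's nine per-concept substring scans (and the redundant exact() fallbacks) by an
-- inverted bitmask index: one pass computes a 9-bit concept mask per part from a token→bits
-- table, and the per-concept id lists are read off the masks (alternative decomposition).


-- ===== PORT A =====
-- name_map = {pid: name.lower() for pid, name in part_id_to_name.items()}  (shared first line of A and B)
def pvNameMap (part_id_to_name : List (Int × String)) : PySem.Dict Int String :=
  part_id_to_name.foldl (fun d it => d.insert it.1 (PySem.Str.lower it.2)) PySem.Dict.empty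

-- ids_with: the inner 'for t in tokens: if t in nm: append; break' appends once iff some token matches
def pvIdsWith (nm : PySem.Dict Int String) (tokens : List String) : List Int :=
  nm.items.foldl (fun out it => if tokens.any (fun t => PySem.Str.isIn t it.2) then out ++ [it.1] else out) []

def pvExact (nm : PySem.Dict Int String) (names : List String) : List Int :=
  let targets := PySem.Set.ofList (names.map PySem.Str.lower)
  (nm.items.filter (fun it => PySem.Set.contains targets it.2)).map (fun it => it.1)

-- concept_to_parts is a dict whose nine distinct literal keys are assigned once, in order:
-- as an association list that is exactly this list literal; 'x or y' on lists = if x empty then y else x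
def build_default_concept_to_parts (part_id_to_name : List (Int × String)) : List (String × List Int) :=
  let nm := pvNameMap part_id_to_name
  let beak := pvIdsWith nm ["beak", "bill"]
  let breast := pvIdsWith nm ["breast"]
  let belly := pvIdsWith nm ["belly"]
  let back := pvIdsWith nm ["back"]
  let cp : List (String × List Int) :=
    [("beak", if beak.isEmpty then pvExact nm ["beak"] else beak),
     ("wing", pvIdsWith nm ["wing"]),
     ("eye", pvIdsWith nm ["eye"]),
     ("leg", pvIdsWith nm ["leg"]),
     ("tail", pvIdsWith nm ["tail"]),
     ("head", pvIdsWith nm ["crown", "forehead", "nape", "throat", "beak", "bill", "eye", "head"]),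
     ("breast", if breast.isEmpty then pvExact nm ["breast"] else breast),
     ("belly", if belly.isEmpty then pvExact nm ["belly"] else belly),
     ("back", if back.isEmpty then pvExact nm ["back"] else back)]
  cp.filter (fun kv => decide (0 < kv.2.length))

-- ===== PORT B =====
def pvConcepts : List String := ["beak", "wing", "eye", "leg", "tail", "head", "breast", "belly", "back"]

-- TOKEN_BITS, in insertion order (bit i of the value = concept i of pvConcepts)
def pvTokenBits : List (String × Nat) :=
  [("beak", 33), ("bill", 33), ("wing", 2), ("eye", 36), ("leg", 8), ("tail", 16),
   ("crown", 32), ("forehead", 32), ("nape", 32), ("throat", 32), ("head", 32),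
   ("breast", 64), ("belly", 128), ("back", 256)]

-- the inner loop 'm = 0; for tok, bits in TOKEN_BITS.items(): if tok in nm: m |= bits'
def pvMaskOf (nm : String) : Nat :=
  pvTokenBits.foldl (fun m tb => if PySem.Str.isIn tb.1 nm then m ||| tb.2 else m) 0

def build_default_concept_to_parts_alt (part_id_to_name : List (Int × String)) : List (String × List Int) :=
  let nameMap := pvNameMap part_id_to_name
  -- masks = []; for pid, nm in name_map.items(): …; masks.append((pid, m))
  let masks := nameMap.items.foldl (fun acc it => acc ++ [(it.1, pvMaskOf it.2)]) []
  -- result = []; for i, concept in enumerate(CONCEPTS): result.append((concept, [pid for pid, m in masks if (m >> i) & 1]))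
  let result := (PySem.List.enumerate pvConcepts).foldl (fun acc ic =>
      acc ++ [(ic.2, (masks.filter (fun pm => (pm.2 >>> ic.1.toNat) &&& 1 != 0)).map (fun pm => pm.1))]) []
  -- dict(kv for kv in result if kv[1]): the concept keys are pairwise distinct, so this dict
  -- is exactly the filtered association list
  result.filter (fun kv => !kv.2.isEmpty)

-- ===== PRECONDITION & SPEC =====
def Spec_build_default_concept_to_parts (part_id_to_name : List (Int × String)) (out : List (String × List Int)) : Prop := out = build_default_concept_to_parts_alt part_id_to_name
instance (part_id_to_name : List (Int × String)) (out : List (String × List Int)) : Decidable (Spec_build_default_concept_to_parts part_id_to_name out) := by unfold Spec_build_default_concept_to_parts; infer_instance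

-- ===== CLAIM (what is proved, stated in full; the proofs are below) =====
def Claim_equal_build_default_concept_to_parts : Prop := ∀ (part_id_to_name : List (Int × String)), Dom_build_default_concept_to_parts part_id_to_name → Spec_build_default_concept_to_parts part_id_to_name (build_default_concept_to_parts part_id_to_name)

-- ===== LEMMAS AND PROOFS =====

lemma pv_ids_with_eq (nm : PySem.Dict Int String) (toks : List String) :
    pvIdsWith nm toks
      = (nm.items.filter (fun it => toks.any (fun t => PySem.Str.isIn t it.2))).map (fun it => it.1) := by
  unfold pvIdsWith
  rw [PySem.List.foldl_append_if]
  simp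

lemma pv_exact_nil (nm : PySem.Dict Int String) (t : String) (toks : List String)
    (ht : t ∈ toks) (hlow : PySem.Str.lower t = t)
    (h : pvIdsWith nm toks = []) : pvExact nm [t] = [] := by
  rw [pv_ids_with_eq, List.map_eq_nil_iff, List.filter_eq_nil_iff] at h
  unfold pvExact
  simp only [List.map, hlow]
  rw [List.map_eq_nil_iff, List.filter_eq_nil_iff]
  intro it hit
  have hfalse := h it hit
  simp only [List.any_eq_true, not_exists, not_and, Bool.not_eq_true] at hfalse ⊢
  rw [Bool.eq_false_iff]
  intro hcontains
  have h2 : it.2 = t := by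
    have := PySem.Set.contains_iff (PySem.Set.ofList [t]) it.2 |>.mp hcontains
    simpa [PySem.Set.mem_ofList] using this
  have := hfalse t ht
  rw [h2] at this
  have hinf : t.toList <:+: t.toList := List.infix_refl _
  rw [← PySem.Str.isIn_iff_infix, this] at hinf
  exact Bool.false_ne_true hinf

lemma pv_or_exact (nm : PySem.Dict Int String) (t : String) (toks : List String)
    (ht : t ∈ toks) (hlow : PySem.Str.lower t = t) :
    (if (pvIdsWith nm toks).isEmpty then pvExact nm [t] else pvIdsWith nm toks) = pvIdsWith nm toks := by
  by_cases h : (pvIdsWith nm toks).isEmpty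
  · rw [if_pos h, List.isEmpty_iff] at *
    rw [pv_exact_nil nm t toks ht hlow h, h]
  · rw [if_neg h]

-- the append-accumulator loop building masks is a map
lemma pv_masks_eq (L : List (Int × String)) :
    L.foldl (fun acc it => acc ++ [(it.1, pvMaskOf it.2)]) [] = L.map (fun it => (it.1, pvMaskOf it.2)) := by
  have h : ∀ acc : List (Int × Nat), L.foldl (fun acc it => acc ++ [(it.1, pvMaskOf it.2)]) acc
      = acc ++ L.map (fun it => (it.1, pvMaskOf it.2)) := by
    induction L with
    | nil => simp
    | cons x L ih => intro acc; simp [List.foldl, ih]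
  simpa using h []

-- bit k of an or-accumulating fold over the token table
lemma pv_fold_testBit (s : String) (k : Nat) (L : List (String × Nat)) (m0 : Nat) :
    Nat.testBit (L.foldl (fun m tb => if PySem.Str.isIn tb.1 s then m ||| tb.2 else m) m0) k
      = (Nat.testBit m0 k || L.any (fun tb => PySem.Str.isIn tb.1 s && Nat.testBit tb.2 k)) := by
  induction L generalizing m0 with
  | nil => simp
  | cons tb L ih =>
    simp only [List.foldl, List.any_cons]
    rw [ih]
    by_cases h : PySem.Str.isIn tb.1 s
    · rw [if_pos h]
      simp only [Nat.testBit_or, h, Bool.true_and, Bool.or_assoc]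
    · rw [if_neg h]
      simp only [Bool.eq_false_iff.mpr h, Bool.false_and, Bool.false_or]

-- Python's '(m >> k) & 1' truthiness is the k-th bit
lemma pv_bit (m k : Nat) : ((m >>> k) &&& 1 != 0) = Nat.testBit m k := by
  rw [Nat.testBit, Nat.and_comm]

lemma pv_mask_bit (s : String) (k : Nat) :
    ((pvMaskOf s >>> k) &&& 1 != 0)
      = pvTokenBits.any (fun tb => PySem.Str.isIn tb.1 s && Nat.testBit tb.2 k) := by
  rw [pv_bit]; unfold pvMaskOf; rw [pv_fold_testBit]; simp

-- filtering a mapped list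
lemma pv_filter_map_masks (L : List (Int × String)) (p : Nat → Bool) :
    ((L.map (fun it => (it.1, pvMaskOf it.2))).filter (fun pm => p pm.2)).map (fun pm => pm.1)
      = (L.filter (fun it => p (pvMaskOf it.2))).map (fun it => it.1) := by
  induction L with
  | nil => rfl
  | cons x L ih =>
    simp only [List.map, List.filter]
    by_cases h : p (pvMaskOf x.2)
    · simp [h, ih]
    · simp [h, ih]

-- bit k of the mask ⇔ some token of concept k occurs, for each of the nine concepts
lemma pv_bitk0 (s : String) : ((pvMaskOf s >>> 0) &&& 1 != 0) = (["beak", "bill"].any (fun t => PySem.Str.isIn t s)) := by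
  rw [pv_mask_bit]
  simp only [pvTokenBits, List.any_cons, List.any_nil,
    show Nat.testBit 33 0 = true from by decide, show Nat.testBit 2 0 = false from by decide,
    show Nat.testBit 36 0 = false from by decide, show Nat.testBit 8 0 = false from by decide,
    show Nat.testBit 16 0 = false from by decide, show Nat.testBit 32 0 = false from by decide,
    show Nat.testBit 64 0 = false from by decide, show Nat.testBit 128 0 = false from by decide,
    show Nat.testBit 256 0 = false from by decide,
    Bool.and_true, Bool.and_false, Bool.or_false]

lemma pv_bitk1 (s : String) : ((pvMaskOf s >>> 1) &&& 1 != 0) = (["wing"].any (fun t => PySem.Str.isIn t s)) := by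
  rw [pv_mask_bit]
  simp only [pvTokenBits, List.any_cons, List.any_nil,
    show Nat.testBit 33 1 = false from by decide, show Nat.testBit 2 1 = true from by decide,
    show Nat.testBit 36 1 = false from by decide, show Nat.testBit 8 1 = false from by decide,
    show Nat.testBit 16 1 = false from by decide, show Nat.testBit 32 1 = false from by decide,
    show Nat.testBit 64 1 = false from by decide, show Nat.testBit 128 1 = false from by decide,
    show Nat.testBit 256 1 = false from by decide,
    Bool.and_true, Bool.and_false, Bool.or_false, Bool.false_or]

lemma pv_bitk2 (s : String) : ((pvMaskOf s >>> 2) &&& 1 != 0) = (["eye"].any (fun t => PySem.Str.isIn t s)) := by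
  rw [pv_mask_bit]
  simp only [pvTokenBits, List.any_cons, List.any_nil,
    show Nat.testBit 33 2 = false from by decide, show Nat.testBit 2 2 = false from by decide,
    show Nat.testBit 36 2 = true from by decide, show Nat.testBit 8 2 = false from by decide,
    show Nat.testBit 16 2 = false from by decide, show Nat.testBit 32 2 = false from by decide,
    show Nat.testBit 64 2 = false from by decide, show Nat.testBit 128 2 = false from by decide,
    show Nat.testBit 256 2 = false from by decide,
    Bool.and_true, Bool.and_false, Bool.or_false, Bool.false_or]

lemma pv_bitk3 (s : String) : ((pvMaskOf s >>> 3) &&& 1 != 0) = (["leg"].any (fun t => PySem.Str.isIn t s)) := by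
  rw [pv_mask_bit]
  simp only [pvTokenBits, List.any_cons, List.any_nil,
    show Nat.testBit 33 3 = false from by decide, show Nat.testBit 2 3 = false from by decide,
    show Nat.testBit 36 3 = false from by decide, show Nat.testBit 8 3 = true from by decide,
    show Nat.testBit 16 3 = false from by decide, show Nat.testBit 32 3 = false from by decide,
    show Nat.testBit 64 3 = false from by decide, show Nat.testBit 128 3 = false from by decide,
    show Nat.testBit 256 3 = false from by decide,
    Bool.and_true, Bool.and_false, Bool.or_false, Bool.false_or]

lemma pv_bitk4 (s : String) : ((pvMaskOf s >>> 4) &&& 1 != 0) = (["tail"].any (fun t => PySem.Str.isIn t s)) := by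
  rw [pv_mask_bit]
  simp only [pvTokenBits, List.any_cons, List.any_nil,
    show Nat.testBit 33 4 = false from by decide, show Nat.testBit 2 4 = false from by decide,
    show Nat.testBit 36 4 = false from by decide, show Nat.testBit 8 4 = false from by decide,
    show Nat.testBit 16 4 = true from by decide, show Nat.testBit 32 4 = false from by decide,
    show Nat.testBit 64 4 = false from by decide, show Nat.testBit 128 4 = false from by decide,
    show Nat.testBit 256 4 = false from by decide,
    Bool.and_true, Bool.and_false, Bool.or_false, Bool.false_or]

lemma pv_bitk5 (s : String) : ((pvMaskOf s >>> 5) &&& 1 != 0) = (["crown", "forehead", "nape", "throat", "beak", "bill", "eye", "head"].any (fun t => PySem.Str.isIn t s)) := by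
  rw [pv_mask_bit]
  simp only [pvTokenBits, List.any_cons, List.any_nil,
    show Nat.testBit 33 5 = true from by decide, show Nat.testBit 2 5 = false from by decide,
    show Nat.testBit 36 5 = true from by decide, show Nat.testBit 8 5 = false from by decide,
    show Nat.testBit 16 5 = false from by decide, show Nat.testBit 32 5 = true from by decide,
    show Nat.testBit 64 5 = false from by decide, show Nat.testBit 128 5 = false from by decide,
    show Nat.testBit 256 5 = false from by decide,
    Bool.and_true, Bool.and_false, Bool.or_false]
  ac_rfl

lemma pv_bitk6 (s : String) : ((pvMaskOf s >>> 6) &&& 1 != 0) = (["breast"].any (fun t => PySem.Str.isIn t s)) := by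
  rw [pv_mask_bit]
  simp only [pvTokenBits, List.any_cons, List.any_nil,
    show Nat.testBit 33 6 = false from by decide, show Nat.testBit 2 6 = false from by decide,
    show Nat.testBit 36 6 = false from by decide, show Nat.testBit 8 6 = false from by decide,
    show Nat.testBit 16 6 = false from by decide, show Nat.testBit 32 6 = false from by decide,
    show Nat.testBit 64 6 = true from by decide, show Nat.testBit 128 6 = false from by decide,
    show Nat.testBit 256 6 = false from by decide,
    Bool.and_true, Bool.and_false, Bool.or_false, Bool.false_or]

lemma pv_bitk7 (s : String) : ((pvMaskOf s >>> 7) &&& 1 != 0) = (["belly"].any (fun t => PySem.Str.isIn t s)) := by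
  rw [pv_mask_bit]
  simp only [pvTokenBits, List.any_cons, List.any_nil,
    show Nat.testBit 33 7 = false from by decide, show Nat.testBit 2 7 = false from by decide,
    show Nat.testBit 36 7 = false from by decide, show Nat.testBit 8 7 = false from by decide,
    show Nat.testBit 16 7 = false from by decide, show Nat.testBit 32 7 = false from by decide,
    show Nat.testBit 64 7 = false from by decide, show Nat.testBit 128 7 = true from by decide,
    show Nat.testBit 256 7 = false from by decide,
    Bool.and_true, Bool.and_false, Bool.or_false, Bool.false_or]

lemma pv_bitk8 (s : String) : ((pvMaskOf s >>> 8) &&& 1 != 0) = (["back"].any (fun t => PySem.Str.isIn t s)) := by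
  rw [pv_mask_bit]
  simp only [pvTokenBits, List.any_cons, List.any_nil,
    show Nat.testBit 33 8 = false from by decide, show Nat.testBit 2 8 = false from by decide,
    show Nat.testBit 36 8 = false from by decide, show Nat.testBit 8 8 = false from by decide,
    show Nat.testBit 16 8 = false from by decide, show Nat.testBit 32 8 = false from by decide,
    show Nat.testBit 64 8 = false from by decide, show Nat.testBit 128 8 = false from by decide,
    show Nat.testBit 256 8 = true from by decide,
    Bool.and_true, Bool.and_false, Bool.or_false, Bool.false_or]

-- the id list a concept reads off the masks is exactly ids_with of its tokens
lemma pv_val (nm : PySem.Dict Int String) (k : Nat) (toks : List String)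
    (hk : ∀ s, ((pvMaskOf s >>> k) &&& 1 != 0) = toks.any (fun t => PySem.Str.isIn t s)) :
    (((nm.items.map (fun it => (it.1, pvMaskOf it.2))).filter (fun pm => (pm.2 >>> k) &&& 1 != 0)).map (fun pm => pm.1))
      = pvIdsWith nm toks := by
  rw [pv_filter_map_masks nm.items (fun m => (m >>> k) &&& 1 != 0), pv_ids_with_eq]
  exact congrArg (List.map _) (List.filter_congr (fun it _ => hk it.2))

lemma pv_filter_pred (x : String × List Int) : decide (0 < x.2.length) = !x.2.isEmpty := by
  cases x with
  | mk a b => cases b <;> simp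

-- ===== VERDICT (by name: the statement is the Claim_ definition above) =====
theorem build_default_concept_to_parts_spec : Claim_equal_build_default_concept_to_parts := by
  intro l _
  unfold Spec_build_default_concept_to_parts
  unfold build_default_concept_to_parts build_default_concept_to_parts_alt
  simp only []
  -- collapse the 'or exact' fallbacks of A
  rw [pv_or_exact _ "beak" _ (by decide) (by decide),
      pv_or_exact _ "breast" _ (by decide) (by decide),
      pv_or_exact _ "belly" _ (by decide) (by decide),
      pv_or_exact _ "back" _ (by decide) (by decide)]
  -- B side: the masks loop is a map, the enumerate loop is nine literal entries
  rw [pv_masks_eq,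
      show PySem.List.enumerate pvConcepts
        = [((0 : Int), "beak"), (1, "wing"), (2, "eye"), (3, "leg"), (4, "tail"),
           (5, "head"), (6, "breast"), (7, "belly"), (8, "back")] from by decide]
  simp only [List.foldl_cons, List.foldl_nil, List.nil_append, List.cons_append,
    show (0 : Int).toNat = 0 from by decide, show (1 : Int).toNat = 1 from by decide,
    show (2 : Int).toNat = 2 from by decide, show (3 : Int).toNat = 3 from by decide,
    show (4 : Int).toNat = 4 from by decide, show (5 : Int).toNat = 5 from by decide,
    show (6 : Int).toNat = 6 from by decide, show (7 : Int).toNat = 7 from by decide,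
    show (8 : Int).toNat = 8 from by decide]
  rw [pv_val _ _ _ pv_bitk0, pv_val _ _ _ pv_bitk1, pv_val _ _ _ pv_bitk2,
      pv_val _ _ _ pv_bitk3, pv_val _ _ _ pv_bitk4, pv_val _ _ _ pv_bitk5,
      pv_val _ _ _ pv_bitk6, pv_val _ _ _ pv_bitk7, pv_val _ _ _ pv_bitk8]
  exact List.filter_congr (fun x _ => pv_filter_pred x)
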